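-- pv_equiv track=rewrite | github.com/AnnaEvergarden/Card-strategy-game | Documentation/_gen_cs_outline.py | iter_code_chars_skipping_strings
-- ===== SOURCE A (Python) =====
-- def iter_code_chars_skipping_strings(line: str):
--     """遍历一行中参与语法计数的字符（跳过字符串与逐字字符串内的括号）。"""
--     i = 0
--     n = len(line)
--     while i < n:
--         if i + 1 < n and line[i : i + 2] == "//":
--             return
--         c = line[i]
--         if i + 1 < n and line[i : i + 2] == '@"':  # verbatim string
--             i += 2
--             while i < n:
--                 if line[i] == '"' and i + 1 < n and line[i + 1] == '"':
--                     i += 2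
--                     continue
--                 if line[i] == '"':
--                     i += 1
--                     break
--                 i += 1
--             continue
--         if c == '"':
--             i += 1
--             while i < n:
--                 if line[i] == "\\" and i + 1 < n:
--                     i += 2
--                     continue
--                 if line[i] == '"':
--                     i += 1
--                     break
--                 i += 1
--             continue
--         if c == "'":
--             i += 1
--             while i < n:
--                 if line[i] == "\\" and i + 1 < n:
--                     i += 2
--                     continue
--                 if line[i] == "'":
--                     i += 1
--                     break
--                 i += 1
--             continue
--         yield c
--         i += 1
-- ===== SOURCE B (Python) =====
-- def iter_code_chars_skipping_strings(line: str):
--     """Flat single-pass state machine: CODE yields chars; STRING/CHAR/VERBATIM swallow literals."""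
--     CODE, STRING, CHAR, VERBATIM = 0, 1, 2, 3
--     state = CODE
--     i, n = 0, len(line)
--     while i < n:
--         c = line[i]
--         if state == CODE:
--             if c == '/' and i + 1 < n and line[i + 1] == '/':
--                 return
--             if c == '@' and i + 1 < n and line[i + 1] == '"':
--                 state, i = VERBATIM, i + 2
--             elif c == '"':
--                 state, i = STRING, i + 1
--             elif c == "'":
--                 state, i = CHAR, i + 1
--             else:
--                 yield c
--                 i += 1
--         elif state == VERBATIM:
--             if c == '"' and i + 1 < n and line[i + 1] == '"':
--                 i += 2
--             elif c == '"':
--                 state, i = CODE, i + 1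
--             else:
--                 i += 1
--         else:
--             quote = '"' if state == STRING else "'"
--             if c == '\\' and i + 1 < n:
--                 i += 2
--             elif c == quote:
--                 state, i = CODE, i + 1
--             else:
--                 i += 1
-- ===== Notes on version B (the rewrite author's own statement) =====
-- stated objective: idiomatic
-- what changed: Replaced A's nested while-loops (an inner scanning loop per literal kind, with two-char slice comparisons) with a single flat one-character-at-a-time state machine (states CODE/STRING/CHAR/VERBATIM) that yields only in CODE.
import Mathlib
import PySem

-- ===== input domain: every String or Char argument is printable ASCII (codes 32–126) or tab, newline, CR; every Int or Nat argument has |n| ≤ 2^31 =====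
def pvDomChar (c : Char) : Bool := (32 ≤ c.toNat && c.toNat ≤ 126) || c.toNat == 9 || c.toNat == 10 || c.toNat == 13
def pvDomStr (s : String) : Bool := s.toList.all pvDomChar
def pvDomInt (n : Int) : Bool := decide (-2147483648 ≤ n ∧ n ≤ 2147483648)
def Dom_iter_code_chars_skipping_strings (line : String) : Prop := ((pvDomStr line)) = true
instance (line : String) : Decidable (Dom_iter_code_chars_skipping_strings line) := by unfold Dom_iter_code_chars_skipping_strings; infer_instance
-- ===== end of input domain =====

-- B is the same scan written as a flat single-character state machine instead of A's nested per-literal loops (objective: idiomatic).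

-- ===== PORT A =====
-- A's inner while-loop for a normal string literal: consumes chars until the closing '"',
-- returning the remainder of the line after the literal ('\\' escapes the next char only if one exists).
def pvStrLoop (l : List Char) : List Char :=
  match l with
  | [] => []
  | c :: rest =>
    if c = '\\' ∧ rest ≠ [] then pvStrLoop rest.tail
    else if c = '"' then rest
    else pvStrLoop rest
termination_by l.length
decreasing_by
  · simp only [List.length_cons]; cases rest <;> simp_all <;> omega
  · simp

-- A's inner while-loop for a char literal.
def pvChrLoop (l : List Char) : List Char :=
  match l with
  | [] => []
  | c :: rest =>
    if c = '\\' ∧ rest ≠ [] then pvChrLoop rest.tail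
    else if c = '\'' then rest
    else pvChrLoop rest
termination_by l.length
decreasing_by
  · simp only [List.length_cons]; cases rest <;> simp_all <;> omega
  · simp

-- A's inner while-loop for a verbatim string: "" is an internal escape, a lone '"' closes.
def pvVerbLoop (l : List Char) : List Char :=
  match l with
  | [] => []
  | c :: rest =>
    if c = '"' ∧ rest.head? = some '"' then pvVerbLoop rest.tail
    else if c = '"' then rest
    else pvVerbLoop rest
termination_by l.length
decreasing_by
  · simp only [List.length_cons]; cases rest <;> simp_all <;> omega
  · simp

theorem pvStrLoop_length_le (l : List Char) : (pvStrLoop l).length ≤ l.length := by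
  match l with
  | [] => rw [pvStrLoop]
  | c :: rest =>
    rw [pvStrLoop]
    by_cases h : c = '\\' ∧ rest ≠ []
    · rw [if_pos h]
      have := pvStrLoop_length_le rest.tail
      cases rest <;> simp_all <;> omega
    · rw [if_neg h]
      by_cases h2 : c = '"'
      · rw [if_pos h2]; simp
      · rw [if_neg h2]
        have := pvStrLoop_length_le rest
        simp; omega
termination_by l.length
decreasing_by
  · cases rest <;> simp_all
  · simp

theorem pvChrLoop_length_le (l : List Char) : (pvChrLoop l).length ≤ l.length := by
  match l with
  | [] => rw [pvChrLoop]
  | c :: rest =>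
    rw [pvChrLoop]
    by_cases h : c = '\\' ∧ rest ≠ []
    · rw [if_pos h]
      have := pvChrLoop_length_le rest.tail
      cases rest <;> simp_all <;> omega
    · rw [if_neg h]
      by_cases h2 : c = '\''
      · rw [if_pos h2]; simp
      · rw [if_neg h2]
        have := pvChrLoop_length_le rest
        simp; omega
termination_by l.length
decreasing_by
  · cases rest <;> simp_all
  · simp

theorem pvVerbLoop_length_le (l : List Char) : (pvVerbLoop l).length ≤ l.length := by
  match l with
  | [] => rw [pvVerbLoop]
  | c :: rest =>
    rw [pvVerbLoop]
    by_cases h : c = '"' ∧ rest.head? = some '"'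
    · rw [if_pos h]
      have := pvVerbLoop_length_le rest.tail
      cases rest <;> simp_all <;> omega
    · rw [if_neg h]
      by_cases h2 : c = '"'
      · rw [if_pos h2]; simp
      · rw [if_neg h2]
        have := pvVerbLoop_length_le rest
        simp; omega
termination_by l.length
decreasing_by
  · cases rest <;> simp_all
  · simp

-- A's outer while-loop: test //, then @" (verbatim), then ", then ', else yield the char.
def pvAMain (l : List Char) : List String :=
  match l with
  | [] => []
  | c :: rest =>
    if c = '/' ∧ rest.head? = some '/' then []
    else if c = '@' ∧ rest.head? = some '"' then pvAMain (pvVerbLoop rest.tail)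
    else if c = '"' then pvAMain (pvStrLoop rest)
    else if c = '\'' then pvAMain (pvChrLoop rest)
    else c.toString :: pvAMain rest
termination_by l.length
decreasing_by
  · have := pvVerbLoop_length_le rest.tail
    cases rest <;> simp_all <;> omega
  · have := pvStrLoop_length_le rest; simp; omega
  · have := pvChrLoop_length_le rest; simp; omega
  · simp

def iter_code_chars_skipping_strings (line : String) : List String :=
  pvAMain line.toList

-- ===== PORT B =====
-- B's states: code / inside "…" / inside '…' / inside @"…".
inductive PvState : Type
  | code | strq | chrq | verb
deriving DecidableEq, Repr

-- B's single while-loop: one character per step, dispatch on the state.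
def pvBLoop (st : PvState) (l : List Char) : List String :=
  match l with
  | [] => []
  | c :: rest =>
    match st with
    | .code =>
      if c = '/' ∧ rest.head? = some '/' then []
      else if c = '@' ∧ rest.head? = some '"' then pvBLoop .verb rest.tail
      else if c = '"' then pvBLoop .strq rest
      else if c = '\'' then pvBLoop .chrq rest
      else c.toString :: pvBLoop .code rest
    | .strq =>
      if c = '\\' ∧ rest ≠ [] then pvBLoop .strq rest.tail
      else if c = '"' then pvBLoop .code rest
      else pvBLoop .strq rest
    | .chrq =>
      if c = '\\' ∧ rest ≠ [] then pvBLoop .chrq rest.tail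
      else if c = '\'' then pvBLoop .code rest
      else pvBLoop .chrq rest
    | .verb =>
      if c = '"' ∧ rest.head? = some '"' then pvBLoop .verb rest.tail
      else if c = '"' then pvBLoop .code rest
      else pvBLoop .verb rest
termination_by l.length
decreasing_by all_goals (cases rest <;> simp_all)

def iter_code_chars_skipping_strings_alt (line : String) : List String :=
  pvBLoop .code line.toList

-- ===== PRECONDITION & SPEC =====
def Spec_iter_code_chars_skipping_strings (line : String) (out : List String) : Prop := out = iter_code_chars_skipping_strings_alt line
instance (line : String) (out : List String) : Decidable (Spec_iter_code_chars_skipping_strings line out) := by unfold Spec_iter_code_chars_skipping_strings; infer_instance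

-- ===== CLAIM (what is proved, stated in full; the proofs are below) =====
def Claim_equal_iter_code_chars_skipping_strings : Prop := ∀ (line : String), Dom_iter_code_chars_skipping_strings line → Spec_iter_code_chars_skipping_strings line (iter_code_chars_skipping_strings line)

-- ===== LEMMAS AND PROOFS =====
theorem pvBLoop_strq (l : List Char) : pvBLoop .strq l = pvBLoop .code (pvStrLoop l) := by
  match l with
  | [] => rw [pvStrLoop]; simp [pvBLoop]
  | c :: rest =>
    rw [pvStrLoop, pvBLoop]
    by_cases h : c = '\\' ∧ rest ≠ []
    · rw [if_pos h, if_pos h]; exact pvBLoop_strq rest.tail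
    · rw [if_neg h, if_neg h]
      by_cases h2 : c = '"'
      · rw [if_pos h2, if_pos h2]
      · rw [if_neg h2, if_neg h2]; exact pvBLoop_strq rest
termination_by l.length
decreasing_by
  · cases rest <;> simp_all
  · simp

theorem pvBLoop_chrq (l : List Char) : pvBLoop .chrq l = pvBLoop .code (pvChrLoop l) := by
  match l with
  | [] => rw [pvChrLoop]; simp [pvBLoop]
  | c :: rest =>
    rw [pvChrLoop, pvBLoop]
    by_cases h : c = '\\' ∧ rest ≠ []
    · rw [if_pos h, if_pos h]; exact pvBLoop_chrq rest.tail
    · rw [if_neg h, if_neg h]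
      by_cases h2 : c = '\''
      · rw [if_pos h2, if_pos h2]
      · rw [if_neg h2, if_neg h2]; exact pvBLoop_chrq rest
termination_by l.length
decreasing_by
  · cases rest <;> simp_all
  · simp

theorem pvBLoop_verb (l : List Char) : pvBLoop .verb l = pvBLoop .code (pvVerbLoop l) := by
  match l with
  | [] => rw [pvVerbLoop]; simp [pvBLoop]
  | c :: rest =>
    rw [pvVerbLoop, pvBLoop]
    by_cases h : c = '"' ∧ rest.head? = some '"'
    · rw [if_pos h, if_pos h]; exact pvBLoop_verb rest.tail
    · rw [if_neg h, if_neg h]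
      by_cases h2 : c = '"'
      · rw [if_pos h2, if_pos h2]
      · rw [if_neg h2, if_neg h2]; exact pvBLoop_verb rest
termination_by l.length
decreasing_by
  · cases rest <;> simp_all
  · simp

theorem pvAMain_eq_pvBLoop (l : List Char) : pvAMain l = pvBLoop .code l := by
  match l with
  | [] => rw [pvAMain]; simp [pvBLoop]
  | c :: rest =>
    rw [pvAMain, pvBLoop]
    by_cases h : c = '/' ∧ rest.head? = some '/'
    · rw [if_pos h, if_pos h]
    · rw [if_neg h, if_neg h]
      by_cases h2 : c = '@' ∧ rest.head? = some '"'
      · rw [if_pos h2, if_pos h2, pvAMain_eq_pvBLoop (pvVerbLoop rest.tail), pvBLoop_verb]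
      · rw [if_neg h2, if_neg h2]
        by_cases h3 : c = '"'
        · rw [if_pos h3, if_pos h3, pvAMain_eq_pvBLoop (pvStrLoop rest), pvBLoop_strq]
        · rw [if_neg h3, if_neg h3]
          by_cases h4 : c = '\''
          · rw [if_pos h4, if_pos h4, pvAMain_eq_pvBLoop (pvChrLoop rest), pvBLoop_chrq]
          · rw [if_neg h4, if_neg h4, pvAMain_eq_pvBLoop rest]
termination_by l.length
decreasing_by
  · have := pvVerbLoop_length_le rest.tail
    cases rest <;> simp_all <;> omega
  · have := pvStrLoop_length_le rest; simp; omega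
  · have := pvChrLoop_length_le rest; simp; omega
  · simp

-- ===== VERDICT (by name: the statement is the Claim_ definition above) =====
theorem iter_code_chars_skipping_strings_spec : Claim_equal_iter_code_chars_skipping_strings := by
  intro line _
  unfold Spec_iter_code_chars_skipping_strings iter_code_chars_skipping_strings iter_code_chars_skipping_strings_alt
  exact pvAMain_eq_pvBLoop line.toList
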